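-- pv_equiv track=rewrite | github.com/jecki/SchnelleSeite | supporting_scripts/extract_locale.py | dump_list
-- ===== SOURCE A (Python) =====
-- def dump_list(l, group=6):  # 9
--     result = ['\n    [ ']
--     for n, item in enumerate(l,1):
--         if n == len(l):
--             s = '"%s"]' % item
--         else:
--             if n % group == 0:
--                 s = '"%s",\n      ' % item
--             else:
--                 s = '"%s", ' % item
--         result.append(s)
--     return "".join(result)
-- ===== SOURCE B (Python) =====
-- def dump_list(l, group=6):
--     g = abs(group)
--     quoted = ['"%s"' % x for x in l]
--     chunks = [quoted[i:i + g] for i in range(0, len(quoted), g)]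
--     return '\n    [ ' + ',\n      '.join(', '.join(c) for c in chunks) + ']'
-- ===== Notes on version B (the rewrite author's own statement) =====
-- stated objective: simpler
-- what changed: Replaces A's enumerate-and-branch single pass (index equality with len(l), n % group tests, accumulating a fragment list) with a quote/chunk/join decomposition: quote all items, slice them into groups of abs(group), join within a chunk with ', ' and across chunks with ',\n '.
-- intended difference: On the empty list A returns '\n [ ' with no closing bracket (unbalanced output, evidently wrong for a dumper), while B returns the balanced '\n [ ]', the intended value. — e.g. on dump_list([], 6): A returns "\n [ ", B returns "\n [ ]"
-- outside the precondition, e.g. on dump_list([], 0): A returns '\n    [ ', B raises ValueError; on dump_list(['a'], 0): A returns '\n    [ "a"]', B raises ValueError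
import Mathlib
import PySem

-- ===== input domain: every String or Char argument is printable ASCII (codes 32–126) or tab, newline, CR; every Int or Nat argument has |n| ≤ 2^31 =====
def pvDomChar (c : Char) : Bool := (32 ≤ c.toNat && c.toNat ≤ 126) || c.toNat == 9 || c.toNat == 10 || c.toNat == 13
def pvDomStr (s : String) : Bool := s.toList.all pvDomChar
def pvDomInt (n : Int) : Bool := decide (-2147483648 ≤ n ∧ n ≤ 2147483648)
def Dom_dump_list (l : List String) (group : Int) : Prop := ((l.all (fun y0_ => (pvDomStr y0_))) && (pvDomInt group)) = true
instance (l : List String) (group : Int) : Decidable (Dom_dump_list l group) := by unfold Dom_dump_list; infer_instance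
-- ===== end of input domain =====

-- B re-implements A as quote / chunk / join (list comprehension + str.join) instead of A's
-- index-branching single pass; same return value on group ≠ 0 and nonempty lists (objective: simpler).

-- ===== PORT A =====
def dump_list (l : List String) (group : Int) : String :=
  let result : List String := ["\n    [ "]
  let result := (PySem.List.enumerate l 1).foldl (fun r p =>
    let s : String :=
      if p.1 == (l.length : Int) then "\"" ++ p.2 ++ "\"]"
      else if PySem.Int.mod p.1 group == 0 then "\"" ++ p.2 ++ "\",\n      "
      else "\"" ++ p.2 ++ "\", "
    r ++ [s]) result
  PySem.Str.join "" result

-- ===== PORT B =====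
-- transcribes Source B's '[quoted[i:i+g] for i in range(0, len(quoted), g)]' for g ≥ 1
-- (step-g slicing = peel the first g items, recurse); g = 0 lies outside Pre_.
def pvChunks (g : Nat) : List String → List (List String)
  | [] => []
  | x :: xs => (x :: xs.take (g - 1)) :: pvChunks g (xs.drop (g - 1))
termination_by xs => xs.length
decreasing_by simp

def dump_list_alt (l : List String) (group : Int) : String :=
  let g : Nat := group.natAbs
  let quoted := l.map (fun x => "\"" ++ x ++ "\"")
  let chunks := pvChunks g quoted
  "\n    [ " ++ PySem.Str.join ",\n      " (chunks.map (fun c => PySem.Str.join ", " c)) ++ "]"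

-- ===== PRECONDITION & SPEC =====
-- Pre_ excludes group = 0: there A raises ZeroDivisionError ('n % group') on every list with
-- at least two items, and B's chunking (range with step 0) raises ValueError even on the
-- empty/one-item lists where A still happens to return.
def Pre_dump_list (l : List String) (group : Int) : Prop := group ≠ 0
instance (l : List String) (group : Int) : Decidable (Pre_dump_list l group) := by unfold Pre_dump_list; infer_instance
def pvWitness_dump_list : List String × Int := (["a", "b", "c"], 2)

-- On the empty list A returns '\n    [ ' with no closing bracket — unbalanced output that is
-- evidently wrong for a dumper — while B returns the balanced '\n    [ ]', the intended value.
def D_dump_list (l : List String) (group : Int) : Prop := l = []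
instance (l : List String) (group : Int) : Decidable (D_dump_list l group) := by unfold D_dump_list; infer_instance

def Spec_dump_list (l : List String) (group : Int) (out : String) : Prop := ¬ D_dump_list l group → out = dump_list_alt l group
instance (l : List String) (group : Int) (out : String) : Decidable (Spec_dump_list l group out) := by unfold Spec_dump_list; infer_instance

def pvDiffWitness_dump_list : List String × Int := ([], 6)
def pvDiffWitnessOut_dump_list : String × String := ("\n    [ ", "\n    [ ]")

-- ===== CLAIM (what is proved, stated in full; the proofs are below) =====
def Claim_unchanged_dump_list : Prop := ∀ (l : List String) (group : Int), Dom_dump_list l group → Pre_dump_list l group → Spec_dump_list l group (dump_list l group)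
def Claim_changed_dump_list : Prop := Dom_dump_list (pvDiffWitness_dump_list.1) (pvDiffWitness_dump_list.2) ∧ Pre_dump_list (pvDiffWitness_dump_list.1) (pvDiffWitness_dump_list.2) ∧ D_dump_list (pvDiffWitness_dump_list.1) (pvDiffWitness_dump_list.2) ∧ dump_list (pvDiffWitness_dump_list.1) (pvDiffWitness_dump_list.2) = pvDiffWitnessOut_dump_list.1 ∧ dump_list_alt (pvDiffWitness_dump_list.1) (pvDiffWitness_dump_list.2) = pvDiffWitnessOut_dump_list.2 ∧ pvDiffWitnessOut_dump_list.1 ≠ pvDiffWitnessOut_dump_list.2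
def Claim_exact_dump_list : Prop := ∀ (l : List String) (group : Int), Dom_dump_list l group → Pre_dump_list l group → D_dump_list l group → dump_list l group ≠ dump_list_alt l group

-- ===== LEMMAS AND PROOFS =====

-- String-level versions of the PySem.Chars join equations
lemma sj_nil (sep : String) : PySem.Str.join sep [] = "" := by
  apply String.toList_inj.mp
  simp [PySem.Str.toList_join, PySem.Chars.join_nil]

lemma sj_single (sep p : String) : PySem.Str.join sep [p] = p := by
  apply String.toList_inj.mp
  simp [PySem.Str.toList_join, PySem.Chars.join_singleton]

lemma sj_cons_cons (sep p q : String) (r : List String) :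
    PySem.Str.join sep (p :: q :: r) = p ++ sep ++ PySem.Str.join sep (q :: r) := by
  apply String.toList_inj.mp
  simp [PySem.Str.toList_join, PySem.Chars.join_cons_cons, String.toList_append]

lemma sj_empty_cons (p : String) (r : List String) :
    PySem.Str.join "" (p :: r) = p ++ PySem.Str.join "" r := by
  cases r with
  | nil => simp [sj_single, sj_nil]
  | cons q r => rw [sj_cons_cons]; simp

-- regrouping the three literal item templates around the quoted item
lemma lit_close (x : String) : "\"" ++ x ++ "\"]" = ("\"" ++ x ++ "\"") ++ "]" := by
  rw [show ("\"]" : String) = "\"" ++ "]" from by decide]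
  simp [String.append_assoc]

lemma lit_nl (x : String) : "\"" ++ x ++ "\",\n      " = ("\"" ++ x ++ "\"") ++ ",\n      " := by
  rw [show ("\",\n      " : String) = "\"" ++ ",\n      " from by decide]
  simp [String.append_assoc]

lemma lit_comma (x : String) : "\"" ++ x ++ "\", " = ("\"" ++ x ++ "\"") ++ ", " := by
  rw [show ("\", " : String) = "\"" ++ ", " from by decide]
  simp [String.append_assoc]

-- a list foldl that only appends is the map
lemma foldl_snoc {α : Type} (f : α → String) (xs : List α) (init : List String) :
    xs.foldl (fun r x => r ++ [f x]) init = init ++ xs.map f := by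
  induction xs generalizing init with
  | nil => simp
  | cons x xs ih => simp [List.foldl_cons, ih]

-- the shared intermediate: group-aware join of the quoted items, k = slots left in the chunk
def pvJ (g : Nat) : Nat → List String → String
  | _, [] => ""
  | _, [x] => "\"" ++ x ++ "\""
  | k, x :: y :: ys =>
      "\"" ++ x ++ "\"" ++ (if k ≤ 1 then ",\n      " else ", ") ++
        pvJ g (if k ≤ 1 then g else k - 1) (y :: ys)
decreasing_by simp

lemma succ_mod (n g : Nat) (hg : 0 < g) :
    (n + 1) % g = if n % g + 1 = g then 0 else n % g + 1 := by
  rcases Nat.eq_or_lt_of_le hg with h1 | h1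
  · rw [← h1]; simp [Nat.mod_one]
  · rw [Nat.add_mod]
    have hlt : n % g < g := Nat.mod_lt n hg
    rw [Nat.mod_eq_of_lt h1]
    split_ifs with h2
    · rw [h2]; simp
    · exact Nat.mod_eq_of_lt (by omega)

lemma mod_zero_iff (group : Int) (m : Nat) :
    (PySem.Int.mod (m : Int) group == 0) = true ↔ m % group.natAbs = 0 := by
  rw [beq_iff_eq, PySem.Int.mod_eq_zero_iff_dvd]
  constructor
  · intro h
    have h2 : (group.natAbs : Int) ∣ (m : Int) := (Int.natAbs_dvd).mpr h
    exact Nat.eq_zero_of_dvd_of_lt (Int.ofNat_dvd.mp h2) |> fun hd => Nat.mod_eq_zero_of_dvd (Int.ofNat_dvd.mp h2)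
  · intro h
    have h2 : group.natAbs ∣ m := Nat.dvd_of_mod_eq_zero h
    exact (Int.natAbs_dvd).mp (Int.ofNat_dvd.mpr h2)

-- ===== A-side characterisation =====
lemma lemA (group : Int) (hg : group ≠ 0) :
    ∀ (t : List String) (n : Nat) (L : Nat), t ≠ [] → n + t.length = L →
    PySem.Str.join "" ((PySem.List.enumerate t ((n : Int) + 1)).map (fun p =>
      if p.1 == (L : Int) then "\"" ++ p.2 ++ "\"]"
      else if PySem.Int.mod p.1 group == 0 then "\"" ++ p.2 ++ "\",\n      "
      else "\"" ++ p.2 ++ "\", "))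
      = pvJ group.natAbs (group.natAbs - n % group.natAbs) t ++ "]" := by
  intro t
  induction t with
  | nil => intro n L h; exact absurd rfl h
  | cons x xs ih =>
    intro n L _ hL
    set g := group.natAbs with hgdef
    have hgpos : 0 < g := Int.natAbs_pos.mpr hg
    have hmlt : n % g < g := Nat.mod_lt n hgpos
    cases xs with
    | nil =>
      have hcond : (((n : Int) + 1) == (L : Int)) = true := by
        rw [beq_iff_eq]; exact_mod_cast (by simpa using hL)
      rw [PySem.List.enumerate_cons, PySem.List.enumerate_nil, List.map_cons, List.map_nil,
        sj_single]
      simp only [hcond, if_true]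
      rw [pvJ, lit_close]
    | cons y ys =>
      have hlen : n + (y :: ys).length + 1 = L := by simpa [Nat.add_comm, Nat.add_assoc, Nat.add_left_comm] using hL
      have hne : (((n : Int) + 1) == (L : Int)) = false := by
        rw [beq_eq_false_iff_ne]
        intro hEq
        have : n + 1 = L := by exact_mod_cast hEq
        simp [List.length] at hlen
        omega
      have hcast : ((n : Int) + 1) = (((n + 1 : Nat)) : Int) := by push_cast; ring
      have hih := ih (n + 1) L (List.cons_ne_nil _ _) (by
        simp only [List.length_cons] at hL ⊢; omega)
      rw [PySem.List.enumerate_cons, List.map_cons, sj_empty_cons]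
      simp only [hne, Bool.false_eq_true, if_false]
      rw [show ((n : Int) + 1 + 1) = (((n + 1 : Nat) : Int) + 1) from by push_cast; ring, hih]
      by_cases hbreak : n % g + 1 = g
      · have hmod : (PySem.Int.mod ((n : Int) + 1) group == 0) = true := by
          rw [hcast, mod_zero_iff, succ_mod n g hgpos, if_pos hbreak]
        have hk1 : g - n % g = 1 := by omega
        have hknext : g - (n + 1) % g = g := by
          rw [succ_mod n g hgpos, if_pos hbreak]
          omega
        rw [hmod, if_pos rfl, hknext, pvJ, hk1, if_pos (le_refl 1), lit_nl]
        simp [String.append_assoc]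
      · have hmod : (PySem.Int.mod ((n : Int) + 1) group == 0) = false := by
          rw [hcast, beq_eq_false_iff_ne]
          intro h
          have h2 : (n + 1) % g = 0 := (mod_zero_iff group (n + 1)).mp (beq_iff_eq.mpr h)
          rw [succ_mod n g hgpos, if_neg hbreak] at h2
          omega
        have hk2 : ¬ (g - n % g ≤ 1) := by omega
        have hknext : g - (n + 1) % g = (g - n % g) - 1 := by
          rw [succ_mod n g hgpos, if_neg hbreak]
          omega
        rw [hmod, if_neg (by simp), hknext, pvJ, if_neg hk2, lit_comma]
        simp only [String.append_assoc]
        rw [if_neg hk2]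

-- ===== B-side characterisation =====
lemma lemB' (g : Nat) (hg : 1 ≤ g) :
    ∀ (q : List String) (k : Nat), 1 ≤ k → k ≤ g →
    pvJ g k q =
      if q.length ≤ k then PySem.Str.join ", " (q.map (fun x => "\"" ++ x ++ "\""))
      else PySem.Str.join ", " ((q.take k).map (fun x => "\"" ++ x ++ "\"")) ++ ",\n      " ++
             pvJ g g (q.drop k) := by
  intro q
  induction q with
  | nil => intro k hk1 _; rw [pvJ]; simp [sj_nil]
  | cons x xs ih =>
    intro k hk1 hkg
    cases xs with
    | nil =>
      rw [pvJ, if_pos (by simpa using hk1)]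
      simp [sj_single]
    | cons y ys =>
      obtain ⟨k', rfl⟩ : ∃ k', k = k' + 1 := ⟨k - 1, by omega⟩
      by_cases hk : k' + 1 ≤ 1
      · have hk0 : k' = 0 := by omega
        subst hk0
        rw [pvJ, if_pos (le_refl 1), if_pos (le_refl 1), if_neg (by simp)]
        simp [sj_single, String.append_assoc]
      · have hih := ih k' (by omega) (by omega)
        rw [pvJ, if_neg hk, if_neg hk, Nat.add_sub_cancel, hih]
        by_cases hlen : (y :: ys).length ≤ k'
        · rw [if_pos hlen, if_pos (by simp at hlen ⊢; omega)]
          conv_rhs => rw [List.map_cons, List.map_cons, sj_cons_cons]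
          simp [String.append_assoc]
        · rw [if_neg hlen, if_neg (by simp at hlen ⊢; omega)]
          obtain ⟨k'', rfl⟩ : ∃ k'', k' = k'' + 1 := ⟨k' - 1, by omega⟩
          simp only [List.take_succ_cons, List.drop_succ_cons, List.map_cons, sj_cons_cons,
            String.append_assoc]

lemma lemB (g : Nat) (hg : 1 ≤ g) :
    ∀ (q : List String),
    PySem.Str.join ",\n      " ((pvChunks g (q.map (fun x => "\"" ++ x ++ "\""))).map
      (fun c => PySem.Str.join ", " c)) = pvJ g g q := by
  suffices h : ∀ (m : Nat) (q : List String), q.length ≤ m →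
      PySem.Str.join ",\n      " ((pvChunks g (q.map (fun x => "\"" ++ x ++ "\""))).map
        (fun c => PySem.Str.join ", " c)) = pvJ g g q by
    intro q; exact h q.length q (le_refl _)
  intro m
  induction m with
  | zero =>
    intro q hq
    rw [List.length_eq_zero_iff.mp (Nat.le_zero.mp hq)]
    rw [List.map_nil, pvChunks, List.map_nil, sj_nil, pvJ]
  | succ m ihm =>
    intro q hq
    cases q with
    | nil => rw [List.map_nil, pvChunks, List.map_nil, sj_nil, pvJ]
    | cons x xs =>
      rw [List.map_cons, pvChunks, ← List.map_take, ← List.map_drop]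
      rw [lemB' g hg (x :: xs) g hg (le_refl g)]
      by_cases hlen : (x :: xs).length ≤ g
      · have hdrop : xs.drop (g - 1) = [] := by
          apply List.eq_nil_of_length_eq_zero
          rw [List.length_drop]
          simp [List.length] at hlen
          omega
        have htake : xs.take (g - 1) = xs := List.take_of_length_le (by simp [List.length] at hlen; omega)
        rw [hdrop, htake, List.map_nil, pvChunks, List.map_cons, List.map_nil, sj_single,
          if_pos hlen, List.map_cons]
      · rw [if_neg hlen]
        have hdne : xs.drop (g - 1) ≠ [] := by
          intro hnil
          have := List.length_drop (i := g - 1) (l := xs) ▸ congrArg List.length hnil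
          simp [List.length] at hlen this
          omega
        have hih := ihm (xs.drop (g - 1)) (by
          rw [List.length_drop]
          simp [List.length] at hq
          omega)
        have htake : (x :: xs).take g = x :: xs.take (g - 1) := by
          obtain ⟨g', rfl⟩ : ∃ g', g = g' + 1 := ⟨g - 1, by omega⟩
          simp [List.take_succ_cons]
        have hdropq : (x :: xs).drop g = xs.drop (g - 1) := by
          obtain ⟨g', rfl⟩ : ∃ g', g = g' + 1 := ⟨g - 1, by omega⟩
          simp [List.drop_succ_cons]
        rw [htake, hdropq, ← hih]
        cases hzz : pvChunks g ((xs.drop (g - 1)).map (fun x => "\"" ++ x ++ "\"")) with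
        | nil =>
          exfalso
          cases hd : xs.drop (g - 1) with
          | nil => exact hdne hd
          | cons z zs =>
            rw [hd, List.map_cons, pvChunks] at hzz
            exact List.cons_ne_nil _ _ hzz
        | cons c cs =>
          simp only [List.map_cons, sj_cons_cons, String.append_assoc]

lemma dump_list_empty (group : Int) : dump_list [] group = "\n    [ " := by
  simp [dump_list, PySem.List.enumerate_nil, sj_single]

lemma dump_list_alt_empty (group : Int) : dump_list_alt [] group = "\n    [ ]" := by
  simp only [dump_list_alt, List.map_nil, pvChunks, sj_nil]
  decide

-- ===== VERDICT (by name: the statement is the Claim_ definition above) =====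
lemma dump_list_eq_join (l : List String) (group : Int) :
    dump_list l group = PySem.Str.join "" ("\n    [ " :: (PySem.List.enumerate l 1).map (fun p =>
      if p.1 == (l.length : Int) then "\"" ++ p.2 ++ "\"]"
      else if PySem.Int.mod p.1 group == 0 then "\"" ++ p.2 ++ "\",\n      "
      else "\"" ++ p.2 ++ "\", ")) := by
  show PySem.Str.join "" ((PySem.List.enumerate l 1).foldl (fun r p =>
      r ++ [if p.1 == (l.length : Int) then "\"" ++ p.2 ++ "\"]"
        else if PySem.Int.mod p.1 group == 0 then "\"" ++ p.2 ++ "\",\n      "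
        else "\"" ++ p.2 ++ "\", "]) ["\n    [ "]) = _
  rw [foldl_snoc]
  rfl

-- ===== VERDICT (by name: the statement is the Claim_ definition above) =====
theorem dump_list_spec : Claim_unchanged_dump_list := by
  intro l group _ hg hD
  have hl : l ≠ [] := fun h => hD h
  have hg1 : 1 ≤ group.natAbs := Int.natAbs_pos.mpr hg
  have hA := lemA group hg l 0 l.length hl (by simp)
  simp only [Nat.cast_zero, zero_add, Nat.zero_mod, Nat.sub_zero] at hA
  rw [dump_list_eq_join, sj_empty_cons, hA]
  show _ = "\n    [ " ++ PySem.Str.join ",\n      " (List.map (fun c => PySem.Str.join ", " c)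
    (pvChunks group.natAbs (List.map (fun x => "\"" ++ x ++ "\"") l))) ++ "]"
  rw [lemB group.natAbs hg1 l, String.append_assoc]

theorem dump_list_changed : Claim_changed_dump_list := by
  unfold Claim_changed_dump_list
  refine ⟨by decide, by decide, by decide, ?_, ?_, by decide⟩
  · exact dump_list_empty 6
  · exact dump_list_alt_empty 6

theorem dump_list_tight : Claim_exact_dump_list := by
  intro l group _ hg hD
  unfold D_dump_list at hD
  subst hD
  rw [dump_list_empty, dump_list_alt_empty]
  decide
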